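-- pv_equiv track=rewrite | github.com/aqm1123/Programming-1 | Python/simple_encryption_decryption.py | message_statistics
-- ===== SOURCE A (Python) =====
-- def message_statistics(message, encoded_message):
--
-- 	all_letters = []
--
--
-- 	letters_message = []
-- 	letters_encoded_message = []
-- 	#seperate letters in message
-- 	for x in message:
-- 		letters_message.append(x)
-- 		all_letters.append(x)
-- 	for y in encoded_message:
-- 		letters_encoded_message.append(y)
-- 		all_letters.append(y)
--
-- 	message_counter = []
-- 	for x in sorted(set(letters_message)):
-- 		appendlist = []
-- 		appendlist.append(x)
-- 		appendlist.append(letters_message.count(x))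
-- 		message_counter.append(appendlist)
--
-- 	encoded_message_counter = []
-- 	for x in sorted(set(letters_encoded_message)):
-- 		appendlist = []
-- 		appendlist.append(x)
-- 		appendlist.append(letters_encoded_message.count(x))
-- 		encoded_message_counter.append(appendlist)
--
-- 	return_dictionary = {}
--
-- 	for x in range(len(message_counter)):
-- 		for i in range(len(encoded_message_counter)):
-- 			if message_counter[x][0] == encoded_message_counter[i][0]:
-- 				return_dictionary[message_counter[x][0]] = [message_counter[x][1], encoded_message_counter[i][1]]
--
-- 	present_key = []
-- 	for key in return_dictionary.keys():
-- 		present_key.append(key)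
--
-- 	for i in range(len(message_counter)):
-- 		if message_counter[i][0] not in present_key:
-- 			return_dictionary[message_counter[i][0]] = [message_counter[i][1], 0]
--
-- 	for i in range(len(encoded_message_counter)):
-- 		if encoded_message_counter[i][0] not in present_key:
-- 			return_dictionary[encoded_message_counter[i][0]] = [0, encoded_message_counter[i][1]]
--
-- 	return return_dictionary
-- ===== SOURCE B (Python) =====
-- def message_statistics(message, encoded_message):
--     mc = _frequencies(message)
--     ec = _frequencies(encoded_message)
--     shared = {c: [mc[c], ec[c]] for c in sorted(mc) if c in ec}
--     only_message = {c: [mc[c], 0] for c in sorted(mc) if c not in ec}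
--     only_encoded = {c: [0, ec[c]] for c in sorted(ec) if c not in mc}
--     return {**shared, **only_message, **only_encoded}
--
--
-- def _frequencies(s):
--     freq = {}
--     for ch in s:
--         freq[ch] = freq.get(ch, 0) + 1
--     return freq
-- ===== Notes on version B (the rewrite author's own statement) =====
-- stated objective: simpler
-- what changed: B builds one single-pass frequency dict per string and produces the result from three comprehensions over the sorted key lists (shared, message-only, encoded-only), replacing A's per-key .count rescans, intermediate [letter, count] lists, O(k_m*k_e) nested index-matching loop and present_key re-listing.
import Mathlib
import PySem

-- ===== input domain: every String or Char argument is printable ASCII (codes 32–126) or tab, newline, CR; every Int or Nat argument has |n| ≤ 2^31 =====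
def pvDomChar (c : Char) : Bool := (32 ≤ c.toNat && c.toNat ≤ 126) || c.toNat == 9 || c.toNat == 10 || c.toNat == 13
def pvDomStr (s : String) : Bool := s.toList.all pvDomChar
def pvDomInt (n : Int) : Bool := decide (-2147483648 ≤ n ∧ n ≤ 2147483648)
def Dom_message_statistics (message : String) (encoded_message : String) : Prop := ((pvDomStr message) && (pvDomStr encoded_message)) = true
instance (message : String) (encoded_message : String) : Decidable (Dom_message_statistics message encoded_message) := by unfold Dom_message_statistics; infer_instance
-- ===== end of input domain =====

-- B replaces A's repeated .count scans, intermediate [letter, count] lists and nested key-matching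
-- loop with two one-pass frequency dicts and three comprehensions (objective: simpler).
-- In both ports letters are carried as Char (Python's 1-char strings, same equality and order);
-- keys are converted to String on return.

-- ===== PORT A =====
def message_statistics (message : String) (encoded_message : String) : List (String × List Int) :=
  let letters_message : List Char := message.toList
  let letters_encoded_message : List Char := encoded_message.toList
  -- (Python also builds all_letters but never reads it)
  let message_counter : List (Char × Int) :=
    (PySem.List.sorted (PySem.Set.ofList letters_message) (fun x => x) false).foldl
      (fun acc x => acc ++ [(x, (letters_message.count x : Int))]) []
  let encoded_message_counter : List (Char × Int) :=
    (PySem.List.sorted (PySem.Set.ofList letters_encoded_message) (fun x => x) false).foldl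
      (fun acc x => acc ++ [(x, (letters_encoded_message.count x : Int))]) []
  let return_dictionary : PySem.Dict Char (List Int) :=
    message_counter.foldl (fun d mx =>
      encoded_message_counter.foldl (fun d ex =>
        if mx.1 == ex.1 then d.insert mx.1 [mx.2, ex.2] else d) d) PySem.Dict.empty
  let present_key : List Char :=
    return_dictionary.keys.foldl (fun acc k => acc ++ [k]) []
  let d2 : PySem.Dict Char (List Int) :=
    message_counter.foldl (fun d mx =>
      if !present_key.contains mx.1 then d.insert mx.1 [mx.2, 0] else d) return_dictionary
  let d3 : PySem.Dict Char (List Int) :=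
    encoded_message_counter.foldl (fun d ex =>
      if !present_key.contains ex.1 then d.insert ex.1 [0, ex.2] else d) d2
  d3.items.map (fun kv => (String.ofList [kv.1], kv.2))

-- ===== PORT B =====
def pvFrequencies (s : List Char) : PySem.Dict Char Int :=
  s.foldl (fun freq ch => freq.insert ch (freq.getD ch 0 + 1)) PySem.Dict.empty

def message_statistics_alt (message : String) (encoded_message : String) : List (String × List Int) :=
  let mc := pvFrequencies message.toList
  let ec := pvFrequencies encoded_message.toList
  let shared : PySem.Dict Char (List Int) :=
    ((PySem.List.sorted mc.keys (fun c => c) false).filter (fun c => ec.contains c)).foldl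
      (fun d c => d.insert c [mc.getD c 0, ec.getD c 0]) PySem.Dict.empty
  let only_message : PySem.Dict Char (List Int) :=
    ((PySem.List.sorted mc.keys (fun c => c) false).filter (fun c => !ec.contains c)).foldl
      (fun d c => d.insert c [mc.getD c 0, 0]) PySem.Dict.empty
  let only_encoded : PySem.Dict Char (List Int) :=
    ((PySem.List.sorted ec.keys (fun c => c) false).filter (fun c => !mc.contains c)).foldl
      (fun d c => d.insert c [0, ec.getD c 0]) PySem.Dict.empty
  let out := (shared.update only_message.items).update only_encoded.items
  out.items.map (fun kv => (String.ofList [kv.1], kv.2))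

-- ===== PRECONDITION & SPEC =====
def Spec_message_statistics (message : String) (encoded_message : String) (out : List (String × List Int)) : Prop := out = message_statistics_alt message encoded_message
instance (message : String) (encoded_message : String) (out : List (String × List Int)) : Decidable (Spec_message_statistics message encoded_message out) := by unfold Spec_message_statistics; infer_instance

-- ===== CLAIM (what is proved, stated in full; the proofs are below) =====
def Claim_equal_message_statistics : Prop := ∀ (message : String) (encoded_message : String), Dom_message_statistics message encoded_message → Spec_message_statistics message encoded_message (message_statistics message encoded_message)

-- ===== LEMMAS AND PROOFS =====

-- A's final dict, on the letter lists (defeq to the dict A's port returns the items of)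
def pvAdict (m e : List Char) : PySem.Dict Char (List Int) :=
  let message_counter : List (Char × Int) :=
    (PySem.List.sorted (PySem.Set.ofList m) (fun x => x) false).foldl
      (fun acc x => acc ++ [(x, (m.count x : Int))]) []
  let encoded_message_counter : List (Char × Int) :=
    (PySem.List.sorted (PySem.Set.ofList e) (fun x => x) false).foldl
      (fun acc x => acc ++ [(x, (e.count x : Int))]) []
  let return_dictionary : PySem.Dict Char (List Int) :=
    message_counter.foldl (fun d mx =>
      encoded_message_counter.foldl (fun d ex =>
        if mx.1 == ex.1 then d.insert mx.1 [mx.2, ex.2] else d) d) PySem.Dict.empty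
  let present_key : List Char :=
    return_dictionary.keys.foldl (fun acc k => acc ++ [k]) []
  let d2 : PySem.Dict Char (List Int) :=
    message_counter.foldl (fun d mx =>
      if !present_key.contains mx.1 then d.insert mx.1 [mx.2, 0] else d) return_dictionary
  encoded_message_counter.foldl (fun d ex =>
    if !present_key.contains ex.1 then d.insert ex.1 [0, ex.2] else d) d2

-- B's final dict, on the letter lists (defeq to the dict B's port returns the items of)
def pvBdict (m e : List Char) : PySem.Dict Char (List Int) :=
  let mc := pvFrequencies m
  let ec := pvFrequencies e
  let shared : PySem.Dict Char (List Int) :=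
    ((PySem.List.sorted mc.keys (fun c => c) false).filter (fun c => ec.contains c)).foldl
      (fun d c => d.insert c [mc.getD c 0, ec.getD c 0]) PySem.Dict.empty
  let only_message : PySem.Dict Char (List Int) :=
    ((PySem.List.sorted mc.keys (fun c => c) false).filter (fun c => !ec.contains c)).foldl
      (fun d c => d.insert c [mc.getD c 0, 0]) PySem.Dict.empty
  let only_encoded : PySem.Dict Char (List Int) :=
    ((PySem.List.sorted ec.keys (fun c => c) false).filter (fun c => !mc.contains c)).foldl
      (fun d c => d.insert c [0, ec.getD c 0]) PySem.Dict.empty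
  (shared.update only_message.items).update only_encoded.items

-- the common item list both final dicts hold
def pvCanon (m e : List Char) : List (Char × List Int) :=
  ((PySem.List.sorted (PySem.Set.ofList m) (fun x => x) false).filter (fun x => e.contains x)).map
      (fun x => (x, [(m.count x : Int), (e.count x : Int)]))
  ++ ((PySem.List.sorted (PySem.Set.ofList m) (fun x => x) false).filter (fun x => !e.contains x)).map
      (fun x => (x, [(m.count x : Int), 0]))
  ++ ((PySem.List.sorted (PySem.Set.ofList e) (fun x => x) false).filter (fun x => !m.contains x)).map
      (fun x => (x, [0, (e.count x : Int)]))

lemma pv_nodup_sorted_ofList (m : List Char) :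
    (PySem.List.sorted (PySem.Set.ofList m) (fun x => x) false).Nodup :=
  (PySem.List.sorted_perm _ _ _).nodup_iff.mpr (PySem.Set.nodup_ofList m)

lemma pv_mem_sorted_ofList (m : List Char) (x : Char) :
    x ∈ PySem.List.sorted (PySem.Set.ofList m) (fun x => x) false ↔ x ∈ m := by
  rw [PySem.List.mem_sorted, PySem.Set.mem_ofList]

-- A's inner matching loop: over a nodup key list, at most one insert fires
lemma pv_inner_loop (T : List Char) (hT : T.Nodup) (a : Char) (w : Char → List Int)
    (d : PySem.Dict Char (List Int)) :
    T.foldl (fun d t => if a == t then d.insert a (w t) else d) d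
      = if T.contains a then d.insert a (w a) else d := by
  induction T generalizing d with
  | nil => simp
  | cons t T ih =>
    rcases List.nodup_cons.mp hT with ⟨ht, hT'⟩
    rw [List.foldl_cons]
    by_cases h : a = t
    · subst h
      rw [if_pos (by simp), ih hT']
      simp only [List.contains_cons, BEq.rfl, Bool.true_or, if_true]
      have hc : T.contains a = false := by simpa using ht
      rw [hc]
      simp
    · have hc : (a == t) = false := by simpa using h
      rw [if_neg (by simp [h]), ih hT']
      simp [h]

-- membership/predicate bridges
lemma pv_contains_sorted_ofList (e : List Char) (x : Char) :
    (PySem.List.sorted (PySem.Set.ofList e) (fun x => x) false).contains x = e.contains x := by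
  simp

-- the three fresh insert loops, peeled into appended item blocks
lemma pv_chain_items (m e : List Char) :
    (List.foldl (fun d x => d.insert x [0, (e.count x : Int)])
      (List.foldl (fun d x => d.insert x [(m.count x : Int), 0])
        (List.foldl (fun d x => d.insert x [(m.count x : Int), (e.count x : Int)])
          PySem.Dict.empty
          ((PySem.List.sorted (PySem.Set.ofList m) (fun x => x) false).filter fun x => e.contains x))
        ((PySem.List.sorted (PySem.Set.ofList m) (fun x => x) false).filter fun x => !e.contains x))
      ((PySem.List.sorted (PySem.Set.ofList e) (fun x => x) false).filter fun x => !m.contains x)).items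
    = pvCanon m e := by
  have hB1 : (List.foldl (fun d x => d.insert x [(m.count x : Int), (e.count x : Int)])
        PySem.Dict.empty ((PySem.List.sorted (PySem.Set.ofList m) (fun x => x) false).filter fun x => e.contains x)).items
      = ((PySem.List.sorted (PySem.Set.ofList m) (fun x => x) false).filter fun x => e.contains x).map
          (fun x => (x, [(m.count x : Int), (e.count x : Int)])) := by
    simpa using PySem.Dict.items_foldl_insert_fresh ((PySem.List.sorted (PySem.Set.ofList m) (fun x => x) false).filter fun x => e.contains x)
      (fun a => a) (fun x => [(m.count x : Int), (e.count x : Int)]) PySem.Dict.empty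
      (by simp) (by simpa using (pv_nodup_sorted_ofList m).filter _)
  have hkeys1 : (List.foldl (fun d x => d.insert x [(m.count x : Int), (e.count x : Int)])
        PySem.Dict.empty ((PySem.List.sorted (PySem.Set.ofList m) (fun x => x) false).filter fun x => e.contains x)).keys
      = (PySem.List.sorted (PySem.Set.ofList m) (fun x => x) false).filter (fun x => e.contains x) := by
    rw [PySem.Dict.keys_foldl_insert]
    have h := PySem.Set.ofList_eq_self_of_nodup _ ((pv_nodup_sorted_ofList m).filter (fun x => e.contains x))
    simp only [PySem.Dict.keys_empty, PySem.Set.update_nil_left, h]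
  have hfresh2 : ∀ a ∈ ((PySem.List.sorted (PySem.Set.ofList m) (fun x => x) false).filter fun x => !e.contains x),
      (List.foldl (fun d x => d.insert x [(m.count x : Int), (e.count x : Int)])
        PySem.Dict.empty ((PySem.List.sorted (PySem.Set.ofList m) (fun x => x) false).filter fun x => e.contains x)).contains a = false := by
    intro a ha
    rw [PySem.Dict.contains_eq_decide_mem_keys, hkeys1]
    have hae : a ∉ e := by simpa using (List.mem_filter.mp ha).2
    simp [List.mem_filter, hae]
  have hB2 : (List.foldl (fun d x => d.insert x [(m.count x : Int), 0])
        (List.foldl (fun d x => d.insert x [(m.count x : Int), (e.count x : Int)])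
          PySem.Dict.empty ((PySem.List.sorted (PySem.Set.ofList m) (fun x => x) false).filter fun x => e.contains x))
        ((PySem.List.sorted (PySem.Set.ofList m) (fun x => x) false).filter fun x => !e.contains x)).items
      = (List.foldl (fun d x => d.insert x [(m.count x : Int), (e.count x : Int)])
          PySem.Dict.empty ((PySem.List.sorted (PySem.Set.ofList m) (fun x => x) false).filter fun x => e.contains x)).items
        ++ ((PySem.List.sorted (PySem.Set.ofList m) (fun x => x) false).filter fun x => !e.contains x).map (fun x => (x, [(m.count x : Int), 0])) := by
    simpa using PySem.Dict.items_foldl_insert_fresh ((PySem.List.sorted (PySem.Set.ofList m) (fun x => x) false).filter fun x => !e.contains x)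
      (fun a => a) (fun x => [(m.count x : Int), 0]) _ hfresh2 (by simpa using (pv_nodup_sorted_ofList m).filter _)
  have hkeys2 : (List.foldl (fun d x => d.insert x [(m.count x : Int), 0])
        (List.foldl (fun d x => d.insert x [(m.count x : Int), (e.count x : Int)])
          PySem.Dict.empty ((PySem.List.sorted (PySem.Set.ofList m) (fun x => x) false).filter fun x => e.contains x))
        ((PySem.List.sorted (PySem.Set.ofList m) (fun x => x) false).filter fun x => !e.contains x)).keys
      = ((PySem.List.sorted (PySem.Set.ofList m) (fun x => x) false).filter fun x => e.contains x) ++ ((PySem.List.sorted (PySem.Set.ofList m) (fun x => x) false).filter fun x => !e.contains x) := by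
    rw [PySem.Dict.keys_foldl_insert, hkeys1]
    apply PySem.Set.update_eq_append_of_disjoint
    · exact (pv_nodup_sorted_ofList m).filter _
    · intro x hx
      have hxe : x ∉ e := by simpa using (List.mem_filter.mp hx).2
      simp [List.mem_filter, hxe]
  have hfresh3 : ∀ a ∈ ((PySem.List.sorted (PySem.Set.ofList e) (fun x => x) false).filter fun x => !m.contains x),
      (List.foldl (fun d x => d.insert x [(m.count x : Int), 0])
        (List.foldl (fun d x => d.insert x [(m.count x : Int), (e.count x : Int)])
          PySem.Dict.empty ((PySem.List.sorted (PySem.Set.ofList m) (fun x => x) false).filter fun x => e.contains x))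
        ((PySem.List.sorted (PySem.Set.ofList m) (fun x => x) false).filter fun x => !e.contains x)).contains a = false := by
    intro a ha
    rw [PySem.Dict.contains_eq_decide_mem_keys, hkeys2]
    have ham : a ∉ m := by simpa using (List.mem_filter.mp ha).2
    have haS : a ∉ PySem.List.sorted (PySem.Set.ofList m) (fun x => x) false := by rw [pv_mem_sorted_ofList]; exact ham
    simp [List.mem_filter, List.mem_append, haS]
  have hB3 : (List.foldl (fun d x => d.insert x [0, (e.count x : Int)])
        (List.foldl (fun d x => d.insert x [(m.count x : Int), 0])
          (List.foldl (fun d x => d.insert x [(m.count x : Int), (e.count x : Int)])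
            PySem.Dict.empty ((PySem.List.sorted (PySem.Set.ofList m) (fun x => x) false).filter fun x => e.contains x))
          ((PySem.List.sorted (PySem.Set.ofList m) (fun x => x) false).filter fun x => !e.contains x))
        ((PySem.List.sorted (PySem.Set.ofList e) (fun x => x) false).filter fun x => !m.contains x)).items
      = (List.foldl (fun d x => d.insert x [(m.count x : Int), 0])
          (List.foldl (fun d x => d.insert x [(m.count x : Int), (e.count x : Int)])
            PySem.Dict.empty ((PySem.List.sorted (PySem.Set.ofList m) (fun x => x) false).filter fun x => e.contains x))
          ((PySem.List.sorted (PySem.Set.ofList m) (fun x => x) false).filter fun x => !e.contains x)).items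
        ++ ((PySem.List.sorted (PySem.Set.ofList e) (fun x => x) false).filter fun x => !m.contains x).map (fun x => (x, [0, (e.count x : Int)])) := by
    simpa using PySem.Dict.items_foldl_insert_fresh ((PySem.List.sorted (PySem.Set.ofList e) (fun x => x) false).filter fun x => !m.contains x)
      (fun a => a) (fun x => [0, (e.count x : Int)]) _ hfresh3 (by simpa using (pv_nodup_sorted_ofList e).filter _)
  rw [hB3, hB2, hB1]
  simp only [pvCanon, List.append_assoc]



lemma pv_items_A (m e : List Char) : (pvAdict m e).items = pvCanon m e := by
  have hSn := pv_nodup_sorted_ofList m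
  have hTn := pv_nodup_sorted_ofList e
  simp only [pvAdict]
  -- name the two sorted key lists
  set S := PySem.List.sorted (PySem.Set.ofList m) (fun x => x) false with hSdef
  set T := PySem.List.sorted (PySem.Set.ofList e) (fun x => x) false with hTdef
  -- the two counter lists are maps
  rw [show List.foldl (fun acc x => acc ++ [(x, (m.count x : Int))]) [] S
      = S.map (fun x => (x, (m.count x : Int))) by
    simpa using PySem.List.foldl_append_singleton_eq_map (fun x => (x, (m.count x : Int))) S []]
  rw [show List.foldl (fun acc x => acc ++ [(x, (e.count x : Int))]) [] T
      = T.map (fun x => (x, (e.count x : Int))) by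
    simpa using PySem.List.foldl_append_singleton_eq_map (fun x => (x, (e.count x : Int))) T []]
  -- collapse the nested matching loop into a filtered insert loop
  rw [show List.foldl
        (fun d mx => List.foldl
          (fun d ex => if (mx.1 == ex.1) = true then d.insert mx.1 [mx.2, ex.2] else d)
          d (T.map fun x => (x, (e.count x : Int))))
        PySem.Dict.empty (S.map fun x => (x, (m.count x : Int)))
      = List.foldl (fun d x => d.insert x [(m.count x : Int), (e.count x : Int)])
          PySem.Dict.empty (S.filter fun x => e.contains x) by
    rw [List.foldl_map, List.foldl_filter]
    apply PySem.List.foldl_congr_mem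
    intro d x _
    rw [List.foldl_map]
    have := pv_inner_loop T hTn x (fun t => [(m.count x : Int), (e.count t : Int)]) d
    simpa [hTdef, pv_mem_sorted_ofList, pv_contains_sorted_ofList] using this]
  -- the keys of the shared-letters dict
  rw [show (List.foldl (fun d x => d.insert x [(m.count x : Int), (e.count x : Int)])
        PySem.Dict.empty (S.filter fun x => e.contains x)).keys
      = S.filter (fun x => e.contains x) by
    rw [PySem.Dict.keys_foldl_insert]
    have h := PySem.Set.ofList_eq_self_of_nodup _ (hSn.filter (fun x => e.contains x))
    simp only [PySem.Dict.keys_empty, PySem.Set.update_nil_left, h]]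
  -- present_key is those keys
  rw [show List.foldl (fun acc k => acc ++ [k]) [] (S.filter fun x => e.contains x)
      = S.filter (fun x => e.contains x) by
    simpa using PySem.List.foldl_append_singleton (S.filter fun x => e.contains x) []]
  -- the message-only loop is a filtered insert loop
  have hstep2 : ∀ d0 : PySem.Dict Char (List Int), List.foldl
        (fun d mx => if (!(S.filter fun x => e.contains x).contains mx.1) = true
          then d.insert mx.1 [mx.2, 0] else d)
        d0 (S.map fun x => (x, (m.count x : Int)))
      = List.foldl (fun d x => d.insert x [(m.count x : Int), 0])
          d0 (S.filter fun x => !e.contains x) := by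
    intro d0
    rw [List.foldl_map, List.foldl_filter]
    apply PySem.List.foldl_congr_mem
    intro d x hx
    have hc : (S.filter (fun y => e.contains y)).contains x = e.contains x := by
      by_cases he : x ∈ e <;> simp [List.mem_filter, hx, he]
    rw [hc]
  rw [hstep2]
  -- the encoded-only loop is a filtered insert loop
  have hstep3 : ∀ d0 : PySem.Dict Char (List Int), List.foldl
        (fun d ex => if (!(S.filter fun x => e.contains x).contains ex.1) = true
          then d.insert ex.1 [0, ex.2] else d)
        d0 (T.map fun x => (x, (e.count x : Int)))
      = List.foldl (fun d x => d.insert x [0, (e.count x : Int)])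
          d0 (T.filter fun x => !m.contains x) := by
    intro d0
    rw [List.foldl_map, List.foldl_filter]
    apply PySem.List.foldl_congr_mem
    intro d x hx
    have hxe : x ∈ e := by
      have := hx; rw [hTdef, pv_mem_sorted_ofList] at this; exact this
    have hc : (S.filter (fun y => e.contains y)).contains x = m.contains x := by
      by_cases hm : x ∈ m <;>
        simp [List.mem_filter, hSdef, hm, hxe]
    rw [hc]
  rw [hstep3]
  exact pv_chain_items m e

lemma pv_items_B (m e : List Char) : (pvBdict m e).items = pvCanon m e := by
  have hmc : pvFrequencies m = PySem.Dict.counter m :=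
    PySem.Dict.foldl_insert_getD_add_one_eq_counter m
  have hec : pvFrequencies e = PySem.Dict.counter e :=
    PySem.Dict.foldl_insert_getD_add_one_eq_counter e
  simp only [pvBdict, hmc, hec, PySem.Dict.keys_counter, PySem.Dict.contains_counter,
    PySem.Dict.getD_counter]
  have hup : ∀ (d : PySem.Dict Char (List Int)) (l : List Char) (v : Char → List Int),
      PySem.Dict.update d (l.map (fun x => (x, v x))) = l.foldl (fun d x => d.insert x (v x)) d := by
    intro d l v
    simp only [PySem.Dict.update]
    rw [List.foldl_map]
  have hOM : (List.foldl (fun d c => d.insert c [(m.count c : Int), 0]) PySem.Dict.empty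
        ((PySem.List.sorted (PySem.Set.ofList m) (fun c => c) false).filter fun c => !e.contains c)).items
      = ((PySem.List.sorted (PySem.Set.ofList m) (fun c => c) false).filter fun c => !e.contains c).map
          (fun c => (c, [(m.count c : Int), 0])) := by
    simpa using PySem.Dict.items_foldl_insert_fresh _ (fun a => a) (fun c => [(m.count c : Int), 0])
      PySem.Dict.empty (by simp) (by simpa using (pv_nodup_sorted_ofList m).filter _)
  have hOE : (List.foldl (fun d c => d.insert c [0, (e.count c : Int)]) PySem.Dict.empty
        ((PySem.List.sorted (PySem.Set.ofList e) (fun c => c) false).filter fun c => !m.contains c)).items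
      = ((PySem.List.sorted (PySem.Set.ofList e) (fun c => c) false).filter fun c => !m.contains c).map
          (fun c => (c, [0, (e.count c : Int)])) := by
    simpa using PySem.Dict.items_foldl_insert_fresh _ (fun a => a) (fun c => [0, (e.count c : Int)])
      PySem.Dict.empty (by simp) (by simpa using (pv_nodup_sorted_ofList e).filter _)
  rw [hOM, hOE, hup, hup]
  exact pv_chain_items m e

-- ===== VERDICT (by name: the statement is the Claim_ definition above) =====
theorem message_statistics_spec : Claim_equal_message_statistics := by
  intro message encoded_message _
  show message_statistics message encoded_message = message_statistics_alt message encoded_message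
  have hA : message_statistics message encoded_message
      = (pvAdict message.toList encoded_message.toList).items.map
          (fun kv => (String.ofList [kv.1], kv.2)) := rfl
  have hB : message_statistics_alt message encoded_message
      = (pvBdict message.toList encoded_message.toList).items.map
          (fun kv => (String.ofList [kv.1], kv.2)) := rfl
  rw [hA, hB, pv_items_A, pv_items_B]
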